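-- pv_equiv track=rewrite | github.com/CliftonZG/LeetCode-Tutorial | Apply Operations to an Array.py | solution4
-- ===== SOURCE A (Python) =====
-- def solution4(nums):
--     """
--     Using only 1 array and 1 while loop.
--     Directly modify the nums array by just deleting all zeros, as well doing the operations.
--     Then adding the zeros into the end of the nums array.
--
--     In-place algorithms overwrite the input to save space, but sometimes this can cause problems.
--
--     There are a couple of situations where an in-place algorithm might not be suitable:
--         The algorithm needs to run in a multi-threaded environment without exclusive access to the array.
--         Other threads might need to read the array as well and may not expect it to be modified.
--         Even if there is only a single thread or the algorithm has exclusive access to the array while running,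
--         the array might need to be reused later or by another thread once the lock has been released.
--     """
--     zeros = 0
--     size = len(nums)
--     i = 0
--     while i < size:
--         num = nums[i]
--         if num == 0:
--             zeros += 1
--             del nums[i]
--             size -= 1
--         else:
--             if i < size - 1:
--                 if nums[i] == nums[i + 1]:
--                     nums[i] = num * 2
--                     nums[i + 1] = 0
--             i += 1
--
--     return nums + ([0] * zeros)
-- ===== SOURCE B (Python) =====
-- def solution4(nums):
--     # One pass of adjacent doubling over index pairs, then a stable
--     # partition: nonzeros first, zeros appended. No in-place deletion.
--     n = len(nums)
--     out = list(nums)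
--     for i in range(n - 1):
--         if out[i] == out[i + 1]:
--             out[i] = out[i] * 2
--             out[i + 1] = 0
--     nonzeros = [x for x in out if x != 0]
--     return nonzeros + [0] * (n - len(nonzeros))
-- ===== Notes on version B (the rewrite author's own statement) =====
-- stated objective: faster
-- what changed: Replaced A's in-place while loop that deletes each zero from the list (an O(n) del inside the loop) by a single adjacent-doubling pass over index pairs followed by a stable nonzero/zero partition built as new lists.
import Mathlib
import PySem

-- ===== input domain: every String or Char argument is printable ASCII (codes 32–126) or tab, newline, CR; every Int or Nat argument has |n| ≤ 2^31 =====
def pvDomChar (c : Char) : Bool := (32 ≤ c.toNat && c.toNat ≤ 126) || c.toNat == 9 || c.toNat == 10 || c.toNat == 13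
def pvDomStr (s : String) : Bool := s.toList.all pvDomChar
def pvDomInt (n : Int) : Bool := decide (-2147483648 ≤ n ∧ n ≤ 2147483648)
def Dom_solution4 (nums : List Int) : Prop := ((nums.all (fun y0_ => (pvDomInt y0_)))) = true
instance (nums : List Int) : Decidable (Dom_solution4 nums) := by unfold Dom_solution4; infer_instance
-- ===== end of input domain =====

-- B replaces A's quadratic delete-as-you-go while loop by one doubling pass plus a
-- stable nonzero/zero partition; equivalence is about the RETURN value only (A also
-- mutates its argument in place, B does not).

-- ===== PORT A =====
-- A's while loop: state (nums, zeros, i); size is always len(nums) in A.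
def solution4Loop (nums : List Int) (zeros i : Nat) : List Int × Nat :=
  if h : i < nums.length then
    let num := nums.getD i 0
    if num = 0 then
      solution4Loop (nums.eraseIdx i) (zeros + 1) i
    else
      if i < nums.length - 1 then
        if num = nums.getD (i + 1) 0 then
          solution4Loop ((nums.set i (num * 2)).set (i + 1) 0) zeros (i + 1)
        else
          solution4Loop nums zeros (i + 1)
      else
        solution4Loop nums zeros (i + 1)
  else (nums, zeros)
termination_by nums.length - i
decreasing_by
  · have := List.length_eraseIdx_of_lt (l := nums) (i := i) h; omega
  · simp; omega
  · omega
  · omega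

def solution4 (nums : List Int) : List Int :=
  let p := solution4Loop nums 0 0
  p.1 ++ List.replicate p.2 0

-- ===== PORT B =====
def mergeStep (o : List Int) (i : Nat) : List Int :=
  if o.getD i 0 = o.getD (i + 1) 0 then (o.set i (o.getD i 0 * 2)).set (i + 1) 0 else o

def solution4_alt (nums : List Int) : List Int :=
  let n := nums.length
  let out := (List.range (n - 1)).foldl mergeStep nums
  let nz := out.filter (fun x => x ≠ 0)
  nz ++ List.replicate (n - nz.length) 0

-- ===== PRECONDITION & SPEC =====
def Spec_solution4 (nums : List Int) (out : List Int) : Prop := out = solution4_alt nums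
instance (nums : List Int) (out : List Int) : Decidable (Spec_solution4 nums out) := by unfold Spec_solution4; infer_instance

-- ===== CLAIM (what is proved, stated in full; the proofs are below) =====
def Claim_equal_solution4 : Prop := ∀ (nums : List Int), Dom_solution4 nums → Spec_solution4 nums (solution4 nums)

-- ===== LEMMAS AND PROOFS =====

-- The common structural form of the doubling pass.
def mergePass : List Int → List Int
  | [] => []
  | [a] => [a]
  | a :: b :: t =>
      if a = b then a * 2 :: mergePass (0 :: t) else a :: mergePass (b :: t)
termination_by l => l.length
decreasing_by all_goals (simp; try omega)

-- A's loop, re-expressed on the unprocessed suffix.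
def fA : List Int → Nat → List Int × Nat
  | [], z => ([], z)
  | [a], z => if a = 0 then ([], z + 1) else ([a], z)
  | a :: b :: t, z =>
      if a = 0 then fA (b :: t) (z + 1)
      else if a = b then
        let p := fA (0 :: t) z
        (a * 2 :: p.1, p.2)
      else
        let p := fA (b :: t) z
        (a :: p.1, p.2)
termination_by l _ => l.length
decreasing_by all_goals (simp; try omega)

theorem getD_at_len (pre : List Int) (a : Int) (t : List Int) :
    (pre ++ a :: t).getD pre.length 0 = a := by
  induction pre with
  | nil => rfl
  | cons x xs ih => simpa using ih

theorem getD_at_len_succ (pre : List Int) (a b : Int) (t : List Int) :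
    (pre ++ a :: b :: t).getD (pre.length + 1) 0 = b := by
  induction pre with
  | nil => rfl
  | cons x xs ih => simpa using ih

theorem eraseIdx_at_len (pre : List Int) (a : Int) (t : List Int) :
    (pre ++ a :: t).eraseIdx pre.length = pre ++ t := by
  induction pre with
  | nil => rfl
  | cons x xs ih => simpa [List.eraseIdx] using ih

theorem set_at_len (pre : List Int) (a v : Int) (t : List Int) :
    (pre ++ a :: t).set pre.length v = pre ++ v :: t := by
  induction pre with
  | nil => rfl
  | cons x xs ih => simpa using ih

theorem set_at_len_succ (pre : List Int) (a b v : Int) (t : List Int) :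
    (pre ++ a :: b :: t).set (pre.length + 1) v = pre ++ a :: v :: t := by
  induction pre with
  | nil => rfl
  | cons x xs ih => simpa using ih

theorem mp_zero_cons (t : List Int) :
    (mergePass (0 :: t)).filter (fun x => x ≠ 0) = (mergePass t).filter (fun x => x ≠ 0) := by
  cases t with
  | nil => simp [mergePass]
  | cons b t' =>
      by_cases hb : (0 : Int) = b
      · subst hb
        rw [mergePass, if_pos rfl]
        simp
      · rw [mergePass, if_neg hb]
        simp

theorem fA_zero_cons (t : List Int) (z : Nat) : fA (0 :: t) z = fA t (z + 1) := by
  cases t <;> simp [fA]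

theorem fA_fst_aux (n : Nat) : ∀ (L : List Int), L.length = n → ∀ (z : Nat),
    (fA L z).1 = (mergePass L).filter (fun x => x ≠ 0) := by
  induction n using Nat.strong_induction_on with
  | _ n ih =>
    intro L hn z
    match L with
    | [] => simp [fA, mergePass]
    | [a] =>
        by_cases ha : a = 0
        · simp [fA, mergePass, ha]
        · simp [fA, mergePass, ha]
    | a :: b :: t =>
        by_cases ha : a = 0
        · rw [fA, if_pos ha, ha, mp_zero_cons (b :: t)]
          exact ih (b :: t).length (by simp at hn ⊢; omega) (b :: t) rfl (z + 1)
        · rw [fA, if_neg ha]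
          by_cases hab : a = b
          · rw [if_pos hab]
            have ha2 : a * 2 ≠ 0 := fun h => ha (by omega)
            rw [mergePass, if_pos hab]
            have := ih ((0 : Int) :: t).length (by simp at hn ⊢; omega) (0 :: t) rfl z
            simp [this, ha2]
          · rw [if_neg hab, mergePass, if_neg hab]
            have := ih (b :: t).length (by simp at hn ⊢; omega) (b :: t) rfl z
            simp [this, ha]

theorem fA_fst (L : List Int) (z : Nat) :
    (fA L z).1 = (mergePass L).filter (fun x => x ≠ 0) :=
  fA_fst_aux L.length L rfl z

theorem fA_len_aux (n : Nat) : ∀ (L : List Int), L.length = n → ∀ (z : Nat),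
    ((fA L z).1).length + (fA L z).2 = L.length + z := by
  induction n using Nat.strong_induction_on with
  | _ n ih =>
    intro L hn z
    match L with
    | [] => simp [fA]
    | [a] => by_cases ha : a = 0 <;> (simp [fA, ha]; try omega)
    | a :: b :: t =>
        by_cases ha : a = 0
        · rw [fA, if_pos ha]
          have := ih (b :: t).length (by simp at hn ⊢; omega) (b :: t) rfl (z + 1)
          simp at this ⊢; omega
        · rw [fA, if_neg ha]
          by_cases hab : a = b
          · rw [if_pos hab]
            have := ih ((0 : Int) :: t).length (by simp at hn ⊢; omega) (0 :: t) rfl z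
            simp at this ⊢; omega
          · rw [if_neg hab]
            have := ih (b :: t).length (by simp at hn ⊢; omega) (b :: t) rfl z
            simp at this ⊢; omega

theorem fA_len (L : List Int) (z : Nat) :
    ((fA L z).1).length + (fA L z).2 = L.length + z :=
  fA_len_aux L.length L rfl z

theorem loop_eq_fA_aux (n : Nat) :
    ∀ (rest : List Int), rest.length = n → ∀ (pre : List Int) (z : Nat),
      solution4Loop (pre ++ rest) z pre.length = (pre ++ (fA rest z).1, (fA rest z).2) := by
  induction n using Nat.strong_induction_on with
  | _ n ih =>
    intro rest hn pre z
    cases rest with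
    | nil =>
        rw [solution4Loop]
        simp [fA]
    | cons a t =>
        rw [solution4Loop]
        have hlt : pre.length < (pre ++ a :: t).length := by simp
        rw [dif_pos hlt, getD_at_len]
        by_cases ha : a = 0
        · rw [if_pos ha, eraseIdx_at_len]
          have := ih t.length (by simp at hn; omega) t rfl pre (z + 1)
          rw [this, ha, fA_zero_cons]
        · rw [if_neg ha]
          cases t with
          | nil =>
              have hcond : ¬ pre.length < (pre ++ [a]).length - 1 := by simp
              rw [if_neg hcond]
              have hpre : pre.length + 1 = (pre ++ [a]).length := by simp
              have := ih 0 (by simp at hn; omega) [] rfl (pre ++ [a]) z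
              simp only [List.append_nil] at this
              rw [hpre, this, show fA [a] z = ([a], z) by simp [fA, ha]]
              simp [fA]
          | cons b t' =>
              have hcond : pre.length < (pre ++ a :: b :: t').length - 1 := by simp
              rw [if_pos hcond, getD_at_len_succ]
              by_cases hab : a = b
              · rw [if_pos hab, set_at_len]
                have hset : (pre ++ a * 2 :: b :: t').set (pre.length + 1) 0
                    = pre ++ a * 2 :: (0 : Int) :: t' := set_at_len_succ pre (a * 2) b 0 t'
                rw [hset]
                have hre : pre ++ a * 2 :: (0 : Int) :: t' = (pre ++ [a * 2]) ++ 0 :: t' := by simp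
                have hpre : pre.length + 1 = (pre ++ [a * 2]).length := by simp
                have := ih (0 :: t').length (by simp at hn ⊢; omega) (0 :: t') rfl (pre ++ [a * 2]) z
                rw [hre, hpre, this, fA, if_neg ha]
                simp only [if_pos hab]
                simp
              · rw [if_neg hab]
                have hre : pre ++ a :: b :: t' = (pre ++ [a]) ++ b :: t' := by simp
                have hpre : pre.length + 1 = (pre ++ [a]).length := by simp
                have := ih (b :: t').length (by simp at hn ⊢; omega) (b :: t') rfl (pre ++ [a]) z
                rw [hre, hpre, this, fA, if_neg ha]
                simp only [if_neg hab]
                simp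

theorem pass_eq_aux (n : Nat) :
    ∀ (L : List Int), L.length = n → ∀ (pre : List Int),
      (List.range' pre.length (L.length - 1)).foldl mergeStep (pre ++ L) = pre ++ mergePass L := by
  induction n using Nat.strong_induction_on with
  | _ n ih =>
    intro L hn pre
    match L with
    | [] => simp [mergePass]
    | [a] => simp [mergePass]
    | a :: b :: t =>
        have hlen : (a :: b :: t).length - 1 = t.length + 1 := by simp
        rw [hlen, List.range'_succ, List.foldl_cons]
        have hstep : mergeStep (pre ++ a :: b :: t) pre.length
            = if a = b then pre ++ a * 2 :: (0 : Int) :: t else pre ++ a :: b :: t := by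
          unfold mergeStep
          rw [getD_at_len, getD_at_len_succ]
          by_cases hab : a = b
          · rw [if_pos hab, if_pos hab, set_at_len, set_at_len_succ]
          · rw [if_neg hab, if_neg hab]
        rw [hstep]
        by_cases hab : a = b
        · rw [if_pos hab]
          have hre : pre ++ a * 2 :: (0 : Int) :: t = (pre ++ [a * 2]) ++ 0 :: t := by simp
          have hpre : pre.length + 1 = (pre ++ [a * 2]).length := by simp
          have hlen2 : t.length + 1 = (0 :: t).length - 1 + 1 := by simp
          have := ih ((0 : Int) :: t).length (by simp at hn ⊢; omega) (0 :: t) rfl (pre ++ [a * 2])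
          rw [hre, hpre]
          rw [show List.range' (pre ++ [a * 2]).length (t.length) = List.range' (pre ++ [a * 2]).length (((0 : Int) :: t).length - 1) by simp]
          rw [this, mergePass, if_pos hab]
          simp
        · rw [if_neg hab]
          have hre : pre ++ a :: b :: t = (pre ++ [a]) ++ b :: t := by simp
          have hpre : pre.length + 1 = (pre ++ [a]).length := by simp
          have := ih (b :: t).length (by simp at hn ⊢; omega) (b :: t) rfl (pre ++ [a])
          rw [hre, hpre]
          rw [show List.range' (pre ++ [a]).length (t.length) = List.range' (pre ++ [a]).length ((b :: t).length - 1) by simp]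
          rw [this, mergePass, if_neg hab]
          simp

theorem loop_eq_fA (rest pre : List Int) (z : Nat) :
    solution4Loop (pre ++ rest) z pre.length = (pre ++ (fA rest z).1, (fA rest z).2) :=
  loop_eq_fA_aux rest.length rest rfl pre z

theorem pass_eq_mergePass (L pre : List Int) :
    (List.range' pre.length (L.length - 1)).foldl mergeStep (pre ++ L) = pre ++ mergePass L :=
  pass_eq_aux L.length L rfl pre

-- ===== VERDICT (by name: the statement is the Claim_ definition above) =====
theorem solution4_spec : Claim_equal_solution4 := by
  intro nums _
  show solution4 nums = solution4_alt nums
  have hA := loop_eq_fA nums [] 0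
  have hB := pass_eq_mergePass nums []
  have hf := fA_fst nums 0
  have hl := fA_len nums 0
  simp only [List.nil_append, List.length_nil] at hA hB
  simp only [solution4, solution4_alt, hA, hB, List.range_eq_range', hf]
  have : nums.length - ((mergePass nums).filter (fun x => x ≠ 0)).length = (fA nums 0).2 := by
    rw [← hf]; omega
  rw [this]
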